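-- pv_equiv track=rewrite | github.com/hdPotato34/ukumog-engine | ukumog_engine/incremental.py | _opponent_wins_after_move_counts
-- ===== SOURCE A (Python) =====
-- def _opponent_wins_after_move_counts(
--
--     moves: list[int] | tuple[int, ...],
--     opponent_winning_moves: tuple[int, ...],
-- ) -> dict[int, int]:
--     total = len(opponent_winning_moves)
--     if total == 0:
--         return {move: 0 for move in moves}
--
--     opponent_winning_set = set(opponent_winning_moves)
--     if total == 1:
--         only_move = opponent_winning_moves[0]
--         return {move: 0 if move == only_move else 1 for move in moves}
--
--     return {
--         move: total - 1 if move in opponent_winning_set else total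
--         for move in moves
--     }
-- ===== SOURCE B (Python) =====
-- def _opponent_wins_after_move_counts(
--     moves,
--     opponent_winning_moves,
-- ):
--     total = len(opponent_winning_moves)
--     keys = list(dict.fromkeys(moves))
--     ms = sorted(set(moves))
--     ws = sorted(set(opponent_winning_moves))
--     inter = set()
--     i = j = 0
--     while i < len(ms) and j < len(ws):
--         if ms[i] == ws[j]:
--             inter.add(ms[i])
--             i += 1
--             j += 1
--         elif ms[i] < ws[j]:
--             i += 1
--         else:
--             j += 1
--     return {m: total - 1 if m in inter else total for m in keys}
-- ===== Notes on version B (the rewrite author's own statement) =====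
-- stated objective: alternative
-- what changed: B computes the set of decremented moves by a sort-merge join (sort the deduplicated moves and winners, intersect them with a two-pointer merge) instead of A's per-move hash-membership test, and drops A's total==0/total==1 special branches.
import Mathlib
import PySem

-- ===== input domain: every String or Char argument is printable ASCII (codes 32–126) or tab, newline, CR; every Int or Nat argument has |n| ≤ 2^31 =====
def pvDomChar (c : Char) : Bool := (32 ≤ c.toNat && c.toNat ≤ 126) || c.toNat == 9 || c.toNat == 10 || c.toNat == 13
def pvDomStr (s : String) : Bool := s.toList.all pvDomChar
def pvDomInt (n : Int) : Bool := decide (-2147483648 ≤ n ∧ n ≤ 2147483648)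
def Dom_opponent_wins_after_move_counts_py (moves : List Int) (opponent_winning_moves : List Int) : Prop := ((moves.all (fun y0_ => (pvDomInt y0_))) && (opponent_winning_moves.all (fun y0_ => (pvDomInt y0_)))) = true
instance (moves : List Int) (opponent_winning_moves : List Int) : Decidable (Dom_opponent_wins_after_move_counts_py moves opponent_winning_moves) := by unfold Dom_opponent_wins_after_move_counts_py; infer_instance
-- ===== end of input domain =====

-- B finds the decremented moves by a sort-merge intersection of the deduplicated moves and
-- winners (dropping A's total==0/total==1 branches) instead of per-move hash membership;
-- objective: alternative (same task, different algorithm, not faster).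

-- ===== PORT A =====
def opponent_wins_after_move_counts_py (moves : List Int) (opponent_winning_moves : List Int) : List (Int × Int) :=
  let total : Int := opponent_winning_moves.length
  if total = 0 then
    (moves.foldl (fun d m => d.insert m 0) (PySem.Dict.empty : PySem.Dict Int Int)).items
  else
    let opponent_winning_set : PySem.Set Int := PySem.Set.ofList opponent_winning_moves
    if total = 1 then
      let only_move : Int := PySem.List.pyGetD opponent_winning_moves 0 0
      (moves.foldl (fun d m => d.insert m (if m = only_move then 0 else 1))
        (PySem.Dict.empty : PySem.Dict Int Int)).items
    else
      (moves.foldl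
        (fun d m => d.insert m (if PySem.Set.contains opponent_winning_set m then total - 1 else total))
        (PySem.Dict.empty : PySem.Dict Int Int)).items

-- ===== PORT B =====
-- Source B's two-pointer while loop over the two sorted lists, as structural recursion on the
-- same two suffixes (the indices only ever advance); `inter` is built by set.add of elements
-- never seen before, so collecting them in a list is exact (membership is its only use).
def pvMergeInter : List Int → List Int → List Int
  | [], _ => []
  | _ :: _, [] => []
  | a :: ms, b :: ws =>
    if a = b then a :: pvMergeInter ms ws
    else if a < b then pvMergeInter ms (b :: ws)
    else pvMergeInter (a :: ms) ws
termination_by ms ws => ms.length + ws.length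

def opponent_wins_after_move_counts_py_alt (moves : List Int) (opponent_winning_moves : List Int) : List (Int × Int) :=
  let total : Int := opponent_winning_moves.length
  let keys := PySem.List.dedup moves
  let ms := PySem.List.sorted (PySem.Set.ofList moves) (fun x => x) false
  let ws := PySem.List.sorted (PySem.Set.ofList opponent_winning_moves) (fun x => x) false
  let inter := pvMergeInter ms ws
  (keys.foldl (fun d m => d.insert m (if m ∈ inter then total - 1 else total))
    (PySem.Dict.empty : PySem.Dict Int Int)).items

-- ===== PRECONDITION & SPEC =====
def Spec_opponent_wins_after_move_counts_py (moves : List Int) (opponent_winning_moves : List Int) (out : List (Int × Int)) : Prop := out = opponent_wins_after_move_counts_py_alt moves opponent_winning_moves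
instance (moves : List Int) (opponent_winning_moves : List Int) (out : List (Int × Int)) : Decidable (Spec_opponent_wins_after_move_counts_py moves opponent_winning_moves out) := by unfold Spec_opponent_wins_after_move_counts_py; infer_instance

-- ===== CLAIM (what is proved, stated in full; the proofs are below) =====
def Claim_equal_opponent_wins_after_move_counts_py : Prop := ∀ (moves : List Int) (opponent_winning_moves : List Int), Dom_opponent_wins_after_move_counts_py moves opponent_winning_moves → Spec_opponent_wins_after_move_counts_py moves opponent_winning_moves (opponent_wins_after_move_counts_py moves opponent_winning_moves)

-- ===== LEMMAS AND PROOFS =====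

-- the two-pointer merge of two strictly increasing lists is their intersection (as a set)
theorem mem_pvMergeInter (ms : List Int) : ∀ (ws : List Int) (x : Int),
    ms.Pairwise (· < ·) → ws.Pairwise (· < ·) → (x ∈ pvMergeInter ms ws ↔ x ∈ ms ∧ x ∈ ws) := by
  induction ms with
  | nil => intro ws x _ _; simp [pvMergeInter]
  | cons a ms ihm =>
    intro ws
    induction ws with
    | nil => intro x _ _; simp [pvMergeInter]
    | cons b ws ihw =>
      intro x hms hws
      have hms' := List.pairwise_cons.mp hms
      have hws' := List.pairwise_cons.mp hws
      by_cases hab : a = b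
      · subst hab
        rw [pvMergeInter, if_pos rfl]
        simp only [List.mem_cons, ihm ws x hms'.2 hws'.2]
        constructor
        · rintro (rfl | ⟨h1, h2⟩)
          · exact ⟨Or.inl rfl, Or.inl rfl⟩
          · exact ⟨Or.inr h1, Or.inr h2⟩
        · rintro ⟨h1, h2⟩
          rcases h1 with rfl | h1
          · exact Or.inl rfl
          · rcases h2 with rfl | h2
            · exact absurd (hms'.1 _ h1) (by omega)
            · exact Or.inr ⟨h1, h2⟩
      · by_cases hlt : a < b
        · rw [pvMergeInter, if_neg hab, if_pos hlt]
          simp only [ihm (b :: ws) x hms'.2 hws, List.mem_cons]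
          constructor
          · rintro ⟨h1, h2⟩; exact ⟨Or.inr h1, h2⟩
          · rintro ⟨rfl | h1, rfl | h2⟩
            · omega
            · exact absurd (hws'.1 x h2) (by omega)
            · exact ⟨h1, Or.inl rfl⟩
            · exact ⟨h1, Or.inr h2⟩
        · rw [pvMergeInter, if_neg hab, if_neg hlt]
          simp only [ihw x hms hws'.2, List.mem_cons]
          constructor
          · rintro ⟨h1, h2⟩; exact ⟨h1, Or.inr h2⟩
          · rintro ⟨rfl | h1, rfl | h2⟩
            · omega
            · exact ⟨Or.inl rfl, h2⟩
            · exact absurd (hms'.1 x h1) (by omega)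
            · exact ⟨Or.inr h1, h2⟩

-- value of a dict built by inserting f m for each m
theorem getD_build (f : Int → Int) (moves : List Int) (d : PySem.Dict Int Int) (k dflt : Int) :
    (moves.foldl (fun d m => d.insert m (f m)) d).getD k dflt
      = if k ∈ moves then f k else d.getD k dflt := by
  induction moves generalizing d with
  | nil => simp
  | cons m rest ih =>
    simp only [List.foldl_cons, ih, PySem.Dict.getD_insert, List.mem_cons]
    by_cases h1 : k ∈ rest <;> by_cases h2 : k = m <;> simp [h1, h2]

-- the dict built over `moves` from empty: its items, in closed form
theorem items_build (f : Int → Int) (moves : List Int) :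
    (moves.foldl (fun d m => d.insert m (f m)) (PySem.Dict.empty : PySem.Dict Int Int)).items
      = (PySem.Set.ofList moves).map (fun k => (k, f k)) := by
  have hk : (moves.foldl (fun d m => d.insert m (f m)) (PySem.Dict.empty : PySem.Dict Int Int)).keys
      = PySem.Set.ofList moves := by
    simpa using PySem.Dict.keys_foldl_insert moves (fun _ m => f m) (PySem.Dict.empty : PySem.Dict Int Int)
  have hnd : (moves.foldl (fun d m => d.insert m (f m)) (PySem.Dict.empty : PySem.Dict Int Int)).keys.Nodup := by
    exact PySem.Dict.nodup_keys_foldl_insert moves (fun _ m => f m) _ (by simp)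
  rw [PySem.Dict.items_eq_map_keys _ hnd 0, hk]
  refine List.map_congr_left (fun k hkmem => ?_)
  have hm : k ∈ moves := (PySem.Set.mem_ofList moves k).1 hkmem
  rw [getD_build, if_pos hm]

-- ===== VERDICT (by name: the statement is the Claim_ definition above) =====
theorem opponent_wins_after_move_counts_py_spec : Claim_equal_opponent_wins_after_move_counts_py := by
  intro moves owm _
  unfold Spec_opponent_wins_after_move_counts_py
  unfold opponent_wins_after_move_counts_py
  set total : Int := (owm.length : Int) with htotal
  -- B's side in closed form
  have hB : opponent_wins_after_move_counts_py_alt moves owm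
      = (PySem.Set.ofList moves).map
          (fun k => (k, if k ∈ owm then total - 1 else total)) := by
    unfold opponent_wins_after_move_counts_py_alt
    simp only [← htotal, PySem.List.dedup_eq_ofList]
    rw [items_build (f := fun m =>
      if m ∈ pvMergeInter (PySem.List.sorted (PySem.Set.ofList moves) (fun x => x) false)
          (PySem.List.sorted (PySem.Set.ofList owm) (fun x => x) false) then total - 1 else total)]
    rw [PySem.Set.ofList_eq_self_of_nodup _ (PySem.Set.nodup_ofList moves)]
    refine List.map_congr_left (fun k hkmem => ?_)
    have hm : k ∈ moves := (PySem.Set.mem_ofList moves k).1 hkmem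
    have hmem : k ∈ pvMergeInter (PySem.List.sorted (PySem.Set.ofList moves) (fun x => x) false)
        (PySem.List.sorted (PySem.Set.ofList owm) (fun x => x) false) ↔ k ∈ moves ∧ k ∈ owm := by
      rw [mem_pvMergeInter _ _ k (PySem.List.sorted_ofList_pairwise_lt moves)
        (PySem.List.sorted_ofList_pairwise_lt owm)]
      rw [PySem.List.mem_sorted, PySem.List.mem_sorted, PySem.Set.mem_ofList, PySem.Set.mem_ofList]
    by_cases ho : k ∈ owm
    · rw [if_pos (hmem.2 ⟨hm, ho⟩), if_pos ho]
    · rw [if_neg (fun h => ho (hmem.1 h).2), if_neg ho]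
  rw [hB]
  -- A's side: each branch
  by_cases h0 : total = 0
  · have howm : owm = [] := by
      apply List.length_eq_zero_iff.1; omega
    subst howm
    rw [if_pos h0, items_build (fun _ => 0)]
    refine List.map_congr_left (fun k _ => ?_)
    simp [h0]
  · rw [if_neg h0]
    by_cases h1 : total = 1
    · obtain ⟨x, hx⟩ : ∃ x, owm = [x] := by
        have hlen : owm.length = 1 := by omega
        exact List.length_eq_one_iff.1 hlen
      subst hx
      rw [if_pos h1, items_build (fun m => if m = PySem.List.pyGetD [x] 0 0 then 0 else 1)]
      refine List.map_congr_left (fun k _ => ?_)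
      have hget : PySem.List.pyGetD [x] 0 0 = x := by simp [PySem.List.pyGetD, PySem.List.pyGet?, PySem.List.pyIdx?]
      have ht1 : total = 1 := h1
      by_cases hkx : k = x
      · simp [hget, hkx, ht1]
      · simp [hget, hkx, ht1]
    · rw [if_neg h1,
        items_build (fun m => if PySem.Set.contains (PySem.Set.ofList owm) m then total - 1 else total)]
      refine List.map_congr_left (fun k _ => ?_)
      have hc : PySem.Set.contains (PySem.Set.ofList owm) k = true ↔ k ∈ owm := by
        simp [PySem.Set.contains, PySem.Set.mem_ofList]
      by_cases ho : k ∈ owm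
      · rw [if_pos (hc.2 ho), if_pos ho]
      · rw [if_neg (by simp [ho]), if_neg ho]
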